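-- pv_equiv track=rewrite | github.com/qiancai/ai-pr-translator | scripts/keword_processor.py | _find_insert_index_for_letter
-- ===== SOURCE A (Python) =====
-- def _find_insert_index_for_letter(letter, blocks, tabs_region, lines_len):
--     """Find insertion index for a new letter block in target lines."""
--     if blocks:
--         ordered = sorted(blocks.items(), key=lambda x: x[1]["start_idx"])
--         for existing_letter, meta in ordered:
--             if existing_letter > letter:
--                 return meta["start_idx"]
--
--         last_letter, last_meta = ordered[-1]
--         return last_meta["end_idx"]
--
--     if tabs_region:
--         return tabs_region["end_idx"]
--
--     return lines_len
-- ===== SOURCE B (Python) =====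
-- def _find_insert_index_for_letter(letter, blocks, tabs_region, lines_len):
--     """Single linear pass instead of sorting: track the minimum start_idx among
--     blocks whose letter sorts after `letter`, and the meta of the last block
--     holding the maximum start_idx (>= so later ties win, matching stable sort)."""
--     best = None        # min start_idx among blocks with existing_letter > letter
--     max_start = None   # running maximum start_idx
--     last_meta = None   # meta of the last block attaining max_start
--     for existing_letter, meta in blocks.items():
--         s = meta["start_idx"]
--         if existing_letter > letter and (best is None or s < best):
--             best = s
--         if max_start is None or s >= max_start:
--             max_start = s
--             last_meta = meta
--     if blocks:
--         if best is not None: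
--             return best
--         return last_meta["end_idx"]
--     if tabs_region:
--         return tabs_region["end_idx"]
--     return lines_len
-- ===== Notes on version B (the rewrite author's own statement) =====
-- stated objective: alternative
-- what changed: Replaces A's sort-then-scan (sorted(blocks.items(), key=start_idx), linear scan for the first greater letter, last element for the fallback) by a single linear pass that tracks the minimum start_idx among blocks whose letter sorts after `letter` and the meta of the last block attaining the maximum start_idx (>= update reproduces the stable sort's tie-breaking).
import Mathlib
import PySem

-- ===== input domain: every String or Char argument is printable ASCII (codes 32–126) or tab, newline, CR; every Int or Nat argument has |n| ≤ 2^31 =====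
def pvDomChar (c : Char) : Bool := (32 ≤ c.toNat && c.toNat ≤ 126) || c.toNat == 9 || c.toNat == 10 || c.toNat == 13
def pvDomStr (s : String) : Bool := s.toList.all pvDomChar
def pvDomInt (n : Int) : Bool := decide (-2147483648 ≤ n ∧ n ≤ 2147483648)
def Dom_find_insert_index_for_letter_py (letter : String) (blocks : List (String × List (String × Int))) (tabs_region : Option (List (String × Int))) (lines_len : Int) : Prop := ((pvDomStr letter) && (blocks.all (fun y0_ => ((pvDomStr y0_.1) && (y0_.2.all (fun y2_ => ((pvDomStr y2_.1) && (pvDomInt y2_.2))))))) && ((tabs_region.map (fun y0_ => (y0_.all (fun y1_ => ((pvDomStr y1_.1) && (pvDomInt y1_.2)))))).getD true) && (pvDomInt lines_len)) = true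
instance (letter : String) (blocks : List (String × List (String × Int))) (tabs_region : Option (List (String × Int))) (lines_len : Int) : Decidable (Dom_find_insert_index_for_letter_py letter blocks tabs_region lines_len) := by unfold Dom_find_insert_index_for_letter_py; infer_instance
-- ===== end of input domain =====

-- B replaces A's sort-then-scan by ONE linear pass over the blocks (objective: alternative;
-- return-value equivalence — neither version mutates its arguments).

-- meta["k"]: first-match lookup in the association list (none = KeyError)
def pyLookup? (m : List (String × Int)) (k : String) : Option Int :=
  (m.find? (fun p => p.1 == k)).map (·.2)

-- the sort key x[1]["start_idx"] (total; Pre_ guarantees the lookup succeeds)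
def startKey (b : String × List (String × Int)) : Int :=
  (pyLookup? b.2 "start_idx").getD 0

-- ===== PORT A =====
def find_insert_index_for_letter_py (letter : String) (blocks : List (String × List (String × Int))) (tabs_region : Option (List (String × Int))) (lines_len : Int) : Int :=
  if blocks ≠ [] then
    let ordered := PySem.List.sorted blocks startKey
    match ordered.find? (fun b => decide (letter.toList < b.1.toList)) with
    | some b => (pyLookup? b.2 "start_idx").getD 0
    | none => (pyLookup? ((PySem.List.pyGet? ordered (-1)).getD ("", [])).2 "end_idx").getD 0
  else
    match tabs_region with
    | some d => if d ≠ [] then (pyLookup? d "end_idx").getD 0 else lines_len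
    | none => lines_len

-- ===== PORT B =====
-- loop body: state = (best, max_start, last_meta)
def altStep (letter : String) (st : Option Int × Option Int × Option (List (String × Int)))
    (b : String × List (String × Int)) : Option Int × Option Int × Option (List (String × Int)) :=
  let s := (pyLookup? b.2 "start_idx").getD 0
  let best :=
    if letter.toList < b.1.toList then
      match st.1 with
      | none => some s
      | some v => if s < v then some s else some v
    else st.1
  match st.2.1 with
  | none => (best, some s, some b.2)
  | some m => if m ≤ s then (best, some s, some b.2) else (best, st.2.1, st.2.2)

def find_insert_index_for_letter_py_alt (letter : String) (blocks : List (String × List (String × Int))) (tabs_region : Option (List (String × Int))) (lines_len : Int) : Int :=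
  let st := blocks.foldl (altStep letter) (none, none, none)
  if blocks ≠ [] then
    match st.1 with
    | some v => v
    | none => (pyLookup? (st.2.2.getD []) "end_idx").getD 0
  else
    match tabs_region with
    | some d => if d ≠ [] then (pyLookup? d "end_idx").getD 0 else lines_len
    | none => lines_len

-- ===== PRECONDITION & SPEC =====
def maxStart (blocks : List (String × List (String × Int))) : Int :=
  ((blocks.map startKey).max?).getD 0

-- Exactly the inputs on which Python A returns (no KeyError): every block's meta has
-- "start_idx" (the sort touches them all); when no block letter exceeds `letter`, the
-- last block holding the maximal start_idx (the one A reads end_idx from) has "end_idx";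
-- with no blocks and a nonempty tabs_region, tabs_region has "end_idx".
def Pre_find_insert_index_for_letter_py (letter : String) (blocks : List (String × List (String × Int))) (tabs_region : Option (List (String × Int))) (lines_len : Int) : Prop :=
  ((blocks.all fun b => (pyLookup? b.2 "start_idx").isSome)
   && (!(blocks.all fun b => !decide (letter.toList < b.1.toList))
       || Option.all (fun m => (pyLookup? m.2 "end_idx").isSome)
            ((blocks.filter fun b => startKey b == maxStart blocks).getLast?))
   && (!blocks.isEmpty
       || Option.all (fun d => d.isEmpty || (pyLookup? d "end_idx").isSome) tabs_region)) = true

instance (letter : String) (blocks : List (String × List (String × Int))) (tabs_region : Option (List (String × Int))) (lines_len : Int) : Decidable (Pre_find_insert_index_for_letter_py letter blocks tabs_region lines_len) := by unfold Pre_find_insert_index_for_letter_py; infer_instance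

def pvWitness_find_insert_index_for_letter_py : String × (List (String × List (String × Int))) × (Option (List (String × Int))) × Int :=
  ("b", [("a", [("start_idx", 0), ("end_idx", 2)]), ("c", [("start_idx", 3), ("end_idx", 5)])], some [("end_idx", 7)], 10)

def Spec_find_insert_index_for_letter_py (letter : String) (blocks : List (String × List (String × Int))) (tabs_region : Option (List (String × Int))) (lines_len : Int) (out : Int) : Prop := out = find_insert_index_for_letter_py_alt letter blocks tabs_region lines_len
instance (letter : String) (blocks : List (String × List (String × Int))) (tabs_region : Option (List (String × Int))) (lines_len : Int) (out : Int) : Decidable (Spec_find_insert_index_for_letter_py letter blocks tabs_region lines_len out) := by unfold Spec_find_insert_index_for_letter_py; infer_instance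

-- ===== CLAIM (what is proved, stated in full; the proofs are below) =====
def Claim_equal_find_insert_index_for_letter_py : Prop := ∀ (letter : String) (blocks : List (String × List (String × Int))) (tabs_region : Option (List (String × Int))) (lines_len : Int), Dom_find_insert_index_for_letter_py letter blocks tabs_region lines_len → Pre_find_insert_index_for_letter_py letter blocks tabs_region lines_len → Spec_find_insert_index_for_letter_py letter blocks tabs_region lines_len (find_insert_index_for_letter_py letter blocks tabs_region lines_len)

-- ===== LEMMAS AND PROOFS =====

theorem min?_append_singleton (ys : List Int) (a : Int) :
    (ys ++ [a]).min? = some (match ys.min? with | none => a | some m => min m a) := by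
  cases h : ys.min? with
  | none => simp_all [List.min?_eq_none_iff]
  | some m =>
    rw [List.min?_eq_some_iff] at h ⊢
    obtain ⟨hm, hb⟩ := h
    refine ⟨show min m a ∈ ys ++ [a] from ?_, show ∀ b ∈ ys ++ [a], min m a ≤ b from ?_⟩
    · rcases le_total m a with h' | h'
      · rw [min_eq_left h']; exact List.mem_append_left _ hm
      · rw [min_eq_right h']; exact List.mem_append_right _ (List.mem_singleton.mpr rfl)
    · intro b hb'
      rcases List.mem_append.mp hb' with h' | h'
      · exact le_trans (min_le_left m a) (hb b h')
      · rw [List.mem_singleton.mp h']; exact min_le_right m a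
theorem max?_append_singleton (ys : List Int) (a : Int) :
    (ys ++ [a]).max? = some (match ys.max? with | none => a | some m => max m a) := by
  cases h : ys.max? with
  | none => simp_all [List.max?_eq_none_iff]
  | some m =>
    rw [List.max?_eq_some_iff] at h ⊢
    obtain ⟨hm, hb⟩ := h
    refine ⟨show max m a ∈ ys ++ [a] from ?_, show ∀ b ∈ ys ++ [a], b ≤ max m a from ?_⟩
    · rcases le_total m a with h' | h'
      · rw [max_eq_right h']; exact List.mem_append_right _ (List.mem_singleton.mpr rfl)
      · rw [max_eq_left h']; exact List.mem_append_left _ hm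
    · intro b hb'
      rcases List.mem_append.mp hb' with h' | h'
      · exact le_trans (hb b h') (le_max_left m a)
      · rw [List.mem_singleton.mp h']; exact le_max_right m a
theorem insertBy_ne_nil {α : Type} (bef : α → α → Bool) (x : α) (acc : List α) :
    PySem.List.insertBy bef x acc ≠ [] := by
  cases acc with
  | nil => simp [PySem.List.insertBy]
  | cons y ys => simp only [PySem.List.insertBy]; split <;> simp
theorem getLast?_cons_of_ne_nil' {α : Type} (a : α) (l : List α) (h : l ≠ []) :
    (a :: l).getLast? = l.getLast? := by
  cases l with
  | nil => simp at h
  | cons b t => simp [List.getLast?_cons_cons]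
theorem getLast?_insertBy {α : Type} (bef : α → α → Bool) (x : α) (acc : List α) :
    (PySem.List.insertBy bef x acc).getLast? =
      if acc.all (fun y => !bef x y) then some x else acc.getLast? := by
  induction acc with
  | nil => simp [PySem.List.insertBy]
  | cons y ys ih =>
    simp only [PySem.List.insertBy, List.all_cons]
    by_cases hxy : bef x y = true
    · simp [hxy]
    · simp only [Bool.not_eq_true] at hxy
      rw [if_neg (by simp [hxy])]
      have hne := insertBy_ne_nil bef x ys
      rw [getLast?_cons_of_ne_nil' _ _ hne, ih]
      by_cases hall : ys.all (fun y => !bef x y) = true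
      · simp [hall, hxy]
      · rw [if_neg hall, if_neg (by simp_all)]
        have hys : ys ≠ [] := by rintro rfl; simp at hall
        rw [getLast?_cons_of_ne_nil' _ _ hys]


-- B's running (best) holds the minimum start key over the qualifying blocks
theorem altStep_fst (letter : String) (st : Option Int × Option Int × Option (List (String × Int)))
    (x : String × List (String × Int)) :
    (altStep letter st x).1 =
      (if letter.toList < x.1.toList then
        match st.1 with
        | none => some ((pyLookup? x.2 "start_idx").getD 0)
        | some v => if (pyLookup? x.2 "start_idx").getD 0 < v
                    then some ((pyLookup? x.2 "start_idx").getD 0) else some v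
       else st.1) := by
  obtain ⟨b, mo, lm⟩ := st
  simp only [altStep]
  cases mo with
  | none => rfl
  | some m => by_cases h : m ≤ (pyLookup? x.2 "start_idx").getD 0 <;> simp [h]

theorem altStep_snd (letter : String) (st : Option Int × Option Int × Option (List (String × Int)))
    (x : String × List (String × Int)) :
    (altStep letter st x).2 =
      (match st.2.1 with
       | none => (some ((pyLookup? x.2 "start_idx").getD 0), some x.2)
       | some m => if m ≤ (pyLookup? x.2 "start_idx").getD 0
                   then (some ((pyLookup? x.2 "start_idx").getD 0), some x.2) else st.2) := by
  obtain ⟨b, mo, lm⟩ := st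
  simp only [altStep]
  cases mo with
  | none => rfl
  | some m => by_cases h : m ≤ (pyLookup? x.2 "start_idx").getD 0 <;> simp [h]

theorem alt_best (letter : String) (l : List (String × List (String × Int))) :
    (l.foldl (altStep letter) (none, none, none)).1
      = ((l.filter fun b => decide (letter.toList < b.1.toList)).map startKey).min? := by
  induction l using List.reverseRecOn with
  | nil => rfl
  | append_singleton l x ih =>
    rw [List.foldl_append, List.foldl_cons, List.foldl_nil, altStep_fst, ih,
        List.filter_append]
    by_cases hq : letter.toList < x.1.toList
    · rw [if_pos hq]
      have hfx : List.filter (fun b => decide (letter.toList < b.1.toList)) [x] = [x] := by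
        simp [List.filter, hq]
      rw [hfx, List.map_append, List.map_cons, List.map_nil,
          min?_append_singleton]
      cases h : ((l.filter fun b => decide (letter.toList < b.1.toList)).map startKey).min? with
      | none => simp [startKey]
      | some v =>
        simp only [startKey]
        by_cases hlt : (pyLookup? x.2 "start_idx").getD 0 < v
        · rw [if_pos hlt, min_eq_right (le_of_lt hlt)]
        · rw [if_neg hlt, min_eq_left (by omega)]
    · rw [if_neg hq]
      have hfx : List.filter (fun b => decide (letter.toList < b.1.toList)) [x] = [] := by
        simp [List.filter, hq]
      rw [hfx, List.append_nil]

-- B's running (max_start, last_meta) match the sorted list's last element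
theorem alt_max_last (letter : String) (l : List (String × List (String × Int))) :
    (l.foldl (altStep letter) (none, none, none)).2.1 = (l.map startKey).max? ∧
    (l.foldl (altStep letter) (none, none, none)).2.2
      = ((PySem.List.sorted l startKey).getLast?).map (·.2) := by
  induction l using List.reverseRecOn with
  | nil => exact ⟨rfl, rfl⟩
  | append_singleton l x ih =>
    obtain ⟨ih1, ih2⟩ := ih
    have hsorted : PySem.List.sorted (l ++ [x]) startKey =
        PySem.List.insertBy (fun a b => decide (startKey a < startKey b)) x
          (PySem.List.sorted l startKey) := by
      rw [PySem.List.sorted_eq_foldl_insertBy, PySem.List.sorted_eq_foldl_insertBy,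
          List.foldl_append, List.foldl_cons, List.foldl_nil]
    rw [List.foldl_append, List.foldl_cons, List.foldl_nil]
    cases hM : (l.map startKey).max? with
    | none =>
      have hl : l = [] := by
        have := List.max?_eq_none_iff.mp hM
        simpa using this
      subst hl
      exact ⟨rfl, rfl⟩
    | some m =>
      obtain ⟨hm1, hm2⟩ := List.max?_eq_some_iff.mp hM
      have hall : ((PySem.List.sorted l startKey).all
          (fun y => !decide (startKey x < startKey y)) = true) ↔
          (m ≤ (pyLookup? x.2 "start_idx").getD 0) := by
        rw [List.all_eq_true]
        constructor
        · intro h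
          obtain ⟨y, hy, hky⟩ := List.mem_map.mp hm1
          have := h y ((PySem.List.mem_sorted l startKey false y).mpr hy)
          simp only [Bool.not_eq_eq_eq_not, Bool.not_true, decide_eq_false_iff_not,
            not_lt] at this
          rw [← hky]
          exact this
        · intro h y hy
          have hy' := (PySem.List.mem_sorted l startKey false y).mp hy
          have hle : startKey y ≤ m := hm2 _ (List.mem_map_of_mem hy')
          simp only [Bool.not_eq_eq_eq_not, Bool.not_true, decide_eq_false_iff_not, not_lt]
          calc startKey y ≤ m := hle
            _ ≤ startKey x := h
      rw [altStep_snd, ih1, hM, List.map_append, List.map_cons, List.map_nil,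
          max?_append_singleton, hM, hsorted, getLast?_insertBy]
      dsimp only
      by_cases hle : m ≤ (pyLookup? x.2 "start_idx").getD 0
      · rw [if_pos hle, if_pos (hall.mpr hle)]
        refine ⟨?_, rfl⟩
        show some (startKey x) = some (max m (startKey x))
        rw [max_eq_right (show m ≤ startKey x from hle)]
      · rw [if_neg hle, if_neg (by rw [hall]; exact hle)]
        refine ⟨?_, ih2⟩
        rw [ih1, hM, max_eq_left (show startKey x ≤ m from (not_le.mp hle).le)]

-- the first qualifying element of a key-sorted list carries the minimal qualifying key
theorem min?_perm (xs ys : List Int) (h : xs.Perm ys) : xs.min? = ys.min? := by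
  cases hx : xs.min? with
  | none =>
    have hxe : xs = [] := List.min?_eq_none_iff.mp hx
    subst hxe
    have : ys = [] := List.eq_nil_of_length_eq_zero (by simpa using h.length_eq.symm)
    subst this; rfl
  | some m =>
    obtain ⟨hm, hb⟩ := List.min?_eq_some_iff.mp hx
    symm
    rw [List.min?_eq_some_iff]
    exact ⟨h.mem_iff.mp hm, fun b hbm => hb b (h.mem_iff.mpr hbm)⟩

theorem pyGet?_neg_one {α : Type} (l : List α) (h : l ≠ []) :
    PySem.List.pyGet? l (-1) = l.getLast? := by
  have hl : 1 ≤ l.length := by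
    cases l with | nil => simp at h | cons a t => simp
  simp only [PySem.List.pyGet?, PySem.List.pyIdx?]
  rw [if_neg (by norm_num), if_pos (by omega)]
  simp [List.getLast?_eq_getElem?]

theorem find?_sorted_min (letter : String) (L : List (String × List (String × Int)))
    (hp : L.Pairwise (fun a b => startKey a ≤ startKey b)) :
    (L.find? (fun b => decide (letter.toList < b.1.toList))).map startKey
      = ((L.filter fun b => decide (letter.toList < b.1.toList)).map startKey).min? := by
  induction L with
  | nil => rfl
  | cons a L ih =>
    obtain ⟨ha, hp'⟩ := List.pairwise_cons.mp hp
    by_cases hq : letter.toList < a.1.toList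
    · rw [List.find?_cons_of_pos (by simp [hq]), List.filter_cons_of_pos (by simp [hq]),
          List.map_cons, Option.map_some]
      symm
      rw [List.min?_eq_some_iff]
      refine ⟨List.mem_cons_self, ?_⟩
      intro b hb
      rcases List.mem_cons.mp hb with rfl | hb'
      · exact le_refl _
      · obtain ⟨y, hy, rfl⟩ := List.mem_map.mp hb'
        exact ha y (List.mem_of_mem_filter hy)
    · rw [List.find?_cons_of_neg (by simp [hq]), List.filter_cons_of_neg (by simp [hq])]
      exact ih hp'

-- ===== VERDICT (by name: the statement is the Claim_ definition above) =====
theorem find_insert_index_for_letter_py_spec : Claim_equal_find_insert_index_for_letter_py := by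
  intro letter blocks tabs_region lines_len _ _
  unfold Spec_find_insert_index_for_letter_py find_insert_index_for_letter_py
    find_insert_index_for_letter_py_alt
  dsimp only
  by_cases hb : blocks ≠ []
  · rw [if_pos hb, if_pos hb]
    have hperm := ((PySem.List.sorted_perm blocks startKey false).filter
      (fun b => decide (letter.toList < b.1.toList))).map startKey
    have hbest : (blocks.foldl (altStep letter) (none, none, none)).1
        = ((PySem.List.sorted blocks startKey).find? (fun b => decide (letter.toList < b.1.toList))).map
            startKey := by
      rw [alt_best, find?_sorted_min letter _ (PySem.List.sorted_pairwise blocks startKey)]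
      exact (min?_perm _ _ hperm).symm
    cases hf : (PySem.List.sorted blocks startKey).find? (fun b => decide (letter.toList < b.1.toList)) with
    | some b =>
      rw [hf, Option.map_some] at hbest
      rw [hbest]
      rfl
    | none =>
      rw [hf, Option.map_none] at hbest
      rw [hbest]
      have hne : PySem.List.sorted blocks startKey ≠ [] := by
        rw [ne_eq, PySem.List.sorted_eq_nil_iff]
        exact hb
      cases hlast : (PySem.List.sorted blocks startKey).getLast? with
      | none => exact absurd (List.getLast?_eq_none_iff.mp hlast) hne
      | some g =>
        rw [pyGet?_neg_one _ hne, hlast, (alt_max_last letter blocks).2, hlast]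
        rfl
  · rw [if_neg hb, if_neg hb]
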